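-- pv_equiv track=rewrite | github.com/marberrym/AdventCode | 2023/day3/day3.py | find_whole_number
-- ===== SOURCE A (Python) =====
-- def find_number_start(engine_matrix, row_idx, char_idx):
--     if char_idx > 0:
--         if engine_matrix[row_idx][char_idx - 1].isnumeric():
--             return find_number_start(engine_matrix, row_idx, char_idx - 1)
--         else:
--             return char_idx
--
--     return char_idx
--
-- def find_number_end(engine_matrix, row_idx, char_idx):
--     if char_idx < (len(engine_matrix[row_idx]) - 1):
--         if engine_matrix[row_idx][char_idx + 1].isnumeric():
--             return find_number_end(engine_matrix, row_idx, char_idx + 1)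
--         else:
--             return char_idx
--
--     return char_idx
--
-- def find_whole_number(engine_matrix, row_idx, char_idx):
--     number = ''
--     start_idx = find_number_start(engine_matrix, row_idx, char_idx)
--     end_idx = find_number_end(engine_matrix, row_idx, char_idx)
--     indexes = range(start_idx, end_idx + 1)
--     for d in indexes:
--         number += engine_matrix[row_idx][d]
--     return number
-- ===== SOURCE B (Python) =====
-- def find_whole_number(engine_matrix, row_idx, char_idx):
--     row = engine_matrix[row_idx]
--     number = row[char_idx]
--     i = char_idx
--     while i > 0 and row[i - 1].isnumeric():
--         i -= 1
--         number = row[i] + number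
--     j = char_idx
--     while j < len(row) - 1 and row[j + 1].isnumeric():
--         j += 1
--         number = number + row[j]
--     return number
-- ===== Notes on version B (the rewrite author's own statement) =====
-- stated objective: simpler
-- what changed: The two recursive index-finding helpers and the final range(start,end+1) re-indexing loop are replaced by two in-place while-loops that build the number string directly (prepending digits to the left, appending to the right), so no start/end indexes and no second pass over the row are needed.
import Mathlib
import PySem

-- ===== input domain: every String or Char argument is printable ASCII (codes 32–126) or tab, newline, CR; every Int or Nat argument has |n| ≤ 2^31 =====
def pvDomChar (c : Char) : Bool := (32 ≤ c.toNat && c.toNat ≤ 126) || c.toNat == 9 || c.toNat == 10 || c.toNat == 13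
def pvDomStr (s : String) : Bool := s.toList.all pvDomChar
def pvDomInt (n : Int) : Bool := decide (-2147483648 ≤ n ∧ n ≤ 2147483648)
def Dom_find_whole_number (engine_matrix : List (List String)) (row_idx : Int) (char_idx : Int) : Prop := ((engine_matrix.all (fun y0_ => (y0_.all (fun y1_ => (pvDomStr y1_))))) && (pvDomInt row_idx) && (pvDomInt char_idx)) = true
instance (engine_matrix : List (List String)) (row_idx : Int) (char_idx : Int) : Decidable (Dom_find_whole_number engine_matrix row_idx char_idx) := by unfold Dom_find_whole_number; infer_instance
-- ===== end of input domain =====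

-- B replaces A's two recursive index-finding helpers plus a second indexing pass by two
-- while-loops that build the number string directly around the pivot (objective: simpler).
-- Python's .isnumeric() is ported as PySem.Str.strIsdigit: on the printable-ASCII domain
-- Dom_find_whole_number, isnumeric and isdigit coincide (both = all chars in '0'..'9', nonempty).

-- ===== PORT A =====
def find_number_start (engine_matrix : List (List String)) (row_idx : Int) (char_idx : Int) : Int :=
  if 0 < char_idx then
    if PySem.Str.strIsdigit (PySem.List.pyGetD (PySem.List.pyGetD engine_matrix row_idx []) (char_idx - 1) "") then
      find_number_start engine_matrix row_idx (char_idx - 1)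
    else char_idx
  else char_idx
termination_by char_idx.toNat
decreasing_by omega

def find_number_end (engine_matrix : List (List String)) (row_idx : Int) (char_idx : Int) : Int :=
  if char_idx < ((PySem.List.pyGetD engine_matrix row_idx []).length : Int) - 1 then
    if PySem.Str.strIsdigit (PySem.List.pyGetD (PySem.List.pyGetD engine_matrix row_idx []) (char_idx + 1) "") then
      find_number_end engine_matrix row_idx (char_idx + 1)
    else char_idx
  else char_idx
termination_by (((PySem.List.pyGetD engine_matrix row_idx []).length : Int) - char_idx).toNat
decreasing_by omega

def find_whole_number (engine_matrix : List (List String)) (row_idx : Int) (char_idx : Int) : String :=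
  let start_idx := find_number_start engine_matrix row_idx char_idx
  let end_idx := find_number_end engine_matrix row_idx char_idx
  (PySem.List.pyRange start_idx (end_idx + 1) 1).foldl
    (fun number d => number ++ PySem.List.pyGetD (PySem.List.pyGetD engine_matrix row_idx []) d "") ""

-- ===== PORT B =====
-- while i > 0 and row[i-1].isnumeric(): i -= 1; number = row[i] + number
def pvGoLeft (row : List String) (i : Int) (number : String) : String :=
  if 0 < i ∧ PySem.Str.strIsdigit (PySem.List.pyGetD row (i - 1) "") then
    pvGoLeft row (i - 1) (PySem.List.pyGetD row (i - 1) "" ++ number)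
  else number
termination_by i.toNat
decreasing_by omega

-- while j < len(row) - 1 and row[j+1].isnumeric(): j += 1; number = number + row[j]
def pvGoRight (row : List String) (j : Int) (number : String) : String :=
  if j < (row.length : Int) - 1 ∧ PySem.Str.strIsdigit (PySem.List.pyGetD row (j + 1) "") then
    pvGoRight row (j + 1) (number ++ PySem.List.pyGetD row (j + 1) "")
  else number
termination_by ((row.length : Int) - j).toNat
decreasing_by omega

def find_whole_number_alt (engine_matrix : List (List String)) (row_idx : Int) (char_idx : Int) : String :=
  let row := PySem.List.pyGetD engine_matrix row_idx []
  pvGoRight row char_idx (pvGoLeft row char_idx (PySem.List.pyGetD row char_idx ""))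

-- ===== PRECONDITION & SPEC =====
-- Pre_: exactly the inputs where the Python A returns (otherwise it raises IndexError on
-- engine_matrix[row_idx] or on an element access of the row).
def Pre_find_whole_number (engine_matrix : List (List String)) (row_idx : Int) (char_idx : Int) : Prop :=
  PySem.Raise.InRange engine_matrix.length row_idx ∧
  PySem.Raise.InRange (PySem.List.pyGetD engine_matrix row_idx []).length char_idx
instance (engine_matrix : List (List String)) (row_idx : Int) (char_idx : Int) : Decidable (Pre_find_whole_number engine_matrix row_idx char_idx) := by unfold Pre_find_whole_number; infer_instance

def pvWitness_find_whole_number : List (List String) × Int × Int :=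
  ([["4", "6", "7", ".", "."]], 0, 1)

def Spec_find_whole_number (engine_matrix : List (List String)) (row_idx : Int) (char_idx : Int) (out : String) : Prop := out = find_whole_number_alt engine_matrix row_idx char_idx
instance (engine_matrix : List (List String)) (row_idx : Int) (char_idx : Int) (out : String) : Decidable (Spec_find_whole_number engine_matrix row_idx char_idx out) := by unfold Spec_find_whole_number; infer_instance

-- ===== CLAIM (what is proved, stated in full; the proofs are below) =====
def Claim_equal_find_whole_number : Prop := ∀ (engine_matrix : List (List String)) (row_idx : Int) (char_idx : Int), Dom_find_whole_number engine_matrix row_idx char_idx → Pre_find_whole_number engine_matrix row_idx char_idx → Spec_find_whole_number engine_matrix row_idx char_idx (find_whole_number engine_matrix row_idx char_idx)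

-- ===== LEMMAS AND PROOFS =====

theorem pvWitness_ok : Dom_find_whole_number pvWitness_find_whole_number.1 pvWitness_find_whole_number.2.1 pvWitness_find_whole_number.2.2 ∧ Pre_find_whole_number pvWitness_find_whole_number.1 pvWitness_find_whole_number.2.1 pvWitness_find_whole_number.2.2 := by
  decide

-- concatenation of a list of strings
def pvSJoin (l : List String) : String := l.foldr (· ++ ·) ""

-- the string A gathers over the index interval [a, b)
def pvGather (engine_matrix : List (List String)) (row_idx : Int) (a b : Int) : List String :=
  (PySem.List.pyRange a b 1).map (fun d => PySem.List.pyGetD (PySem.List.pyGetD engine_matrix row_idx []) d "")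

theorem pvSJoin_cons (x : String) (l : List String) : pvSJoin (x :: l) = x ++ pvSJoin l := rfl

theorem pvSJoin_append (l₁ l₂ : List String) : pvSJoin (l₁ ++ l₂) = pvSJoin l₁ ++ pvSJoin l₂ := by
  induction l₁ with
  | nil => simp [pvSJoin]
  | cons x xs ih => rw [List.cons_append, pvSJoin_cons, pvSJoin_cons, ih, String.append_assoc]

theorem pvSJoin_singleton (x : String) : pvSJoin [x] = x := by
  simp [pvSJoin]

theorem pvGather_succ_right (engine_matrix : List (List String)) (row_idx : Int) (a b : Int) (h : a ≤ b) :
    pvGather engine_matrix row_idx a (b + 1) =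
      pvGather engine_matrix row_idx a b ++ [PySem.List.pyGetD (PySem.List.pyGetD engine_matrix row_idx []) b ""] := by
  unfold pvGather
  rw [PySem.List.pyRange_one_succ_right h]
  simp

theorem pvGather_cons (engine_matrix : List (List String)) (row_idx : Int) (a b : Int) (h : a < b) :
    pvGather engine_matrix row_idx a b =
      PySem.List.pyGetD (PySem.List.pyGetD engine_matrix row_idx []) a "" :: pvGather engine_matrix row_idx (a + 1) b := by
  unfold pvGather
  rw [PySem.List.pyRange_one_cons h]
  simp

theorem pv_foldl_concat (g : Int → String) (l : List Int) (init : String) :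
    l.foldl (fun s d => s ++ g d) init = init ++ pvSJoin (l.map g) := by
  induction l generalizing init with
  | nil => simp [pvSJoin]
  | cons x xs ih => simp only [List.foldl]; rw [ih, List.map_cons, pvSJoin_cons, String.append_assoc]

theorem start_le (engine_matrix : List (List String)) (row_idx : Int) (char_idx : Int) :
    find_number_start engine_matrix row_idx char_idx ≤ char_idx := by
  fun_induction find_number_start engine_matrix row_idx char_idx with
  | case1 c h hd ih => omega
  | case2 c h hd => omega
  | case3 c h => omega

theorem end_ge (engine_matrix : List (List String)) (row_idx : Int) (char_idx : Int) :
    char_idx ≤ find_number_end engine_matrix row_idx char_idx := by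
  fun_induction find_number_end engine_matrix row_idx char_idx with
  | case1 c h hd ih => omega
  | case2 c h hd => omega
  | case3 c h => omega

theorem goLeft_eq (engine_matrix : List (List String)) (row_idx : Int) (char_idx : Int) (number : String) :
    pvGoLeft (PySem.List.pyGetD engine_matrix row_idx []) char_idx number =
      pvSJoin (pvGather engine_matrix row_idx (find_number_start engine_matrix row_idx char_idx) char_idx) ++ number := by
  fun_induction find_number_start engine_matrix row_idx char_idx generalizing number with
  | case1 c h hd ih =>
    rw [pvGoLeft]
    simp only [h, hd, and_self, if_true]
    rw [ih]
    have hle : find_number_start engine_matrix row_idx (c - 1) ≤ c - 1 := start_le _ _ _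
    have hc := pvGather_succ_right engine_matrix row_idx (find_number_start engine_matrix row_idx (c - 1)) (c - 1) hle
    rw [Int.sub_add_cancel] at hc
    rw [hc, pvSJoin_append, pvSJoin_singleton, String.append_assoc]
  | case2 c h hd =>
    rw [pvGoLeft]
    simp only [h, hd, Bool.false_eq_true, and_false, if_false]
    simp [pvGather, PySem.List.pyRange_one_eq_nil (le_refl c), pvSJoin]
  | case3 c h =>
    rw [pvGoLeft]
    simp only [show ¬ 0 < c from h, false_and, if_false]
    simp [pvGather, PySem.List.pyRange_one_eq_nil (le_refl c), pvSJoin]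


theorem goRight_eq (engine_matrix : List (List String)) (row_idx : Int) (char_idx : Int) (number : String) :
    pvGoRight (PySem.List.pyGetD engine_matrix row_idx []) char_idx number =
      number ++ pvSJoin (pvGather engine_matrix row_idx (char_idx + 1) (find_number_end engine_matrix row_idx char_idx + 1)) := by
  fun_induction find_number_end engine_matrix row_idx char_idx generalizing number with
  | case1 c h hd ih =>
    rw [pvGoRight]
    simp only [h, hd, and_self, if_true]
    rw [ih]
    have hge : c + 1 ≤ find_number_end engine_matrix row_idx (c + 1) := end_ge _ _ _
    have hc := pvGather_cons engine_matrix row_idx (c + 1) (find_number_end engine_matrix row_idx (c + 1) + 1) (by omega)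
    rw [hc, pvSJoin_cons, String.append_assoc]
  | case2 c h hd =>
    rw [pvGoRight]
    simp only [h, hd, Bool.false_eq_true, and_false, if_false]
    simp [pvGather, PySem.List.pyRange_one_eq_nil (by omega : c + 1 ≤ c + 1), pvSJoin]
  | case3 c h =>
    rw [pvGoRight]
    simp only [show ¬ c < ((PySem.List.pyGetD engine_matrix row_idx []).length : Int) - 1 from h, false_and, if_false]
    simp [pvGather, PySem.List.pyRange_one_eq_nil (by omega : c + 1 ≤ c + 1), pvSJoin]

-- ===== VERDICT (by name: the statement is the Claim_ definition above) =====
theorem find_whole_number_spec : Claim_equal_find_whole_number := by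
  intro em r c _ _
  unfold Spec_find_whole_number
  simp only [find_whole_number, find_whole_number_alt]
  rw [goLeft_eq, goRight_eq, pv_foldl_concat (fun d => PySem.List.pyGetD (PySem.List.pyGetD em r []) d "")]
  have h1 : find_number_start em r c ≤ c := start_le em r c
  have h2 : c ≤ find_number_end em r c := end_ge em r c
  have key : pvGather em r (find_number_start em r c) (find_number_end em r c + 1) =
      pvGather em r (find_number_start em r c) c ++
        [PySem.List.pyGetD (PySem.List.pyGetD em r []) c ""] ++
          pvGather em r (c + 1) (find_number_end em r c + 1) := by
    unfold pvGather
    rw [PySem.List.pyRange_one_append (find_number_start em r c) c (find_number_end em r c + 1) h1 (by omega),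
        PySem.List.pyRange_one_cons (by omega : c < find_number_end em r c + 1)]
    simp
  show ("" : String) ++ pvSJoin (pvGather em r (find_number_start em r c) (find_number_end em r c + 1)) = _
  rw [key, pvSJoin_append, pvSJoin_append, pvSJoin_singleton]
  simp [String.append_assoc]
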